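-- pv_equiv track=rewrite | github.com/Raha-R8/Threes_game | part4.py | count_zero_right
-- ===== SOURCE A (Python) =====
-- def count_zero_right(mat,k1,d1):
--     unchanged_mat = mat
--     count = -1
--     count_index = -1
--     dc = {}
--     for i in mat:
--         count_index+=1
--         a = i[0]
--         if a==0:
--             count+=1
--             dc[count] = count_index
--     m = count+1
--     if m ==0:
--         return unchanged_mat
--     zero_num = k1%m
--     for j in dc.keys():
--         if j==zero_num:
--             change = dc[j]
--     mat[change][0] = d1
--     return mat
-- ===== SOURCE B (Python) =====
-- def count_zero_right(mat, k1, d1):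
--     # Pure rebuild: counts the zero-first rows, then constructs and returns a NEW
--     # matrix (A mutates mat in place; only the return value is claimed equal).
--     # The target counter t is decremented toward 0 instead of counting up, and
--     # the changed row is a fresh list [d1] + row[1:] spliced between the already
--     # accumulated prefix and the untouched remaining suffix mat[i+1:].
--     m = 0
--     for row in mat:
--         if row[0] == 0:
--             m += 1
--     if m == 0:
--         return mat
--     t = k1 % m
--     out = []
--     for i, row in enumerate(mat):
--         if row[0] == 0:
--             if t == 0:
--                 return out + [[d1] + row[1:]] + mat[i + 1:]
--             t -= 1
--         out.append(row)
--     return out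
-- ===== Notes on version B (the rewrite author's own statement) =====
-- stated objective: alternative
-- what changed: A builds a dict from zero-counter to row index, linearly searches its keys for k1%m and mutates mat in place; B never indexes or mutates: it rebuilds and returns a new matrix in one pass, decrementing the target counter and splicing a fresh row [d1]+row[1:] between the accumulated prefix and the untouched suffix.
import Mathlib
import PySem

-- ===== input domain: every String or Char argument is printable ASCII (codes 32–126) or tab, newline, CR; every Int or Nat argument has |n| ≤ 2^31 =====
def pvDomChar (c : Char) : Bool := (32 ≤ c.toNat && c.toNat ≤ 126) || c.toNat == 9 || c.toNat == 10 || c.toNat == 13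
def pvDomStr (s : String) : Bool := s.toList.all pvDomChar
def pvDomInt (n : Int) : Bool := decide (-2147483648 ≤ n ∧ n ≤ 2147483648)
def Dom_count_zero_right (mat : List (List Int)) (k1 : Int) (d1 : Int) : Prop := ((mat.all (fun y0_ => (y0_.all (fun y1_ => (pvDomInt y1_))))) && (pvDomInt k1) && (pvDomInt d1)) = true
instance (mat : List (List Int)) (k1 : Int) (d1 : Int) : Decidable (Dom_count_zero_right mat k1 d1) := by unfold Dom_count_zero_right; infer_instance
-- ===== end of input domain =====

-- B rebuilds and returns a new matrix (no dict index, no mutation) by splicing a fresh changed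
-- row between prefix and suffix; A mutates mat in place, so only the RETURN VALUE is claimed equal.

-- ===== PORT A =====
-- hand port of the item assignment mat[change][0] = d1 (exact for 0 ≤ change < len mat and a
-- nonempty target row, which Pre_ and m ≠ 0 guarantee)
def pvSetAtA : List (List Int) → Int → Int → List (List Int)
  | [], _, _ => []
  | r :: rs, n, v => if n == 0 then (r.set 0 v) :: rs else r :: pvSetAtA rs (n - 1) v

def count_zero_right (mat : List (List Int)) (k1 : Int) (d1 : Int) : List (List Int) :=
  let s := mat.foldl
    (fun (s : Int × Int × PySem.Dict Int Int) i =>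
      let count_index := s.2.1 + 1
      let a := i.headD 0      -- i[0]; Pre_ guarantees every row is nonempty
      if a == 0 then (s.1 + 1, count_index, s.2.2.insert (s.1 + 1) count_index)
      else (s.1, count_index, s.2.2))
    (-1, -1, PySem.Dict.empty)
  let count := s.1
  let dc := s.2.2
  let m := count + 1
  if m == 0 then mat
  else
    let zero_num := PySem.Int.mod k1 m
    -- Python's 'change' starts unbound; it is always assigned since zero_num ∈ dc.keys,
    -- so 0 below is a dummy initial value that is always overwritten
    let change := dc.keys.foldl (fun ch j => if j == zero_num then dc.getD j 0 else ch) 0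
    pvSetAtA mat change d1

-- ===== PORT B =====
-- the rebuilding loop of Source B: accumulator 'out', decrementing target t, early return splicing
-- [d1] + row[1:] before the untouched suffix mat[i+1:] (here: the rows not yet traversed)
def czrBuild : List (List Int) → Int → Int → List (List Int) → List (List Int)
  | [], _, _, out => out
  | r :: rs, t, d1, out =>
    if r.headD 0 == 0 then
      if t == 0 then out ++ [d1 :: r.drop 1] ++ rs
      else czrBuild rs (t - 1) d1 (out ++ [r])
    else czrBuild rs t d1 (out ++ [r])

def count_zero_right_alt (mat : List (List Int)) (k1 : Int) (d1 : Int) : List (List Int) :=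
  let m := mat.foldl (fun (m : Int) row => if row.headD 0 == 0 then m + 1 else m) 0
  if m == 0 then mat
  else czrBuild mat (PySem.Int.mod k1 m) d1 []

-- ===== PRECONDITION & SPEC =====
-- Pre_ excludes exactly the inputs where A raises IndexError: a matrix containing an empty row
-- (the first loop evaluates i[0] on every row).
def Pre_count_zero_right (mat : List (List Int)) (k1 : Int) (d1 : Int) : Prop :=
  (mat.all (fun r => !r.isEmpty)) = true
instance (mat : List (List Int)) (k1 : Int) (d1 : Int) : Decidable (Pre_count_zero_right mat k1 d1) := by unfold Pre_count_zero_right; infer_instance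

def pvWitness_count_zero_right : List (List Int) × Int × Int := ([[0, 1], [2], [0]], 3, 5)

def Spec_count_zero_right (mat : List (List Int)) (k1 : Int) (d1 : Int) (out : List (List Int)) : Prop := out = count_zero_right_alt mat k1 d1
instance (mat : List (List Int)) (k1 : Int) (d1 : Int) (out : List (List Int)) : Decidable (Spec_count_zero_right mat k1 d1 out) := by unfold Spec_count_zero_right; infer_instance

-- ===== CLAIM (what is proved, stated in full; the proofs are below) =====
def Claim_equal_count_zero_right : Prop := ∀ (mat : List (List Int)) (k1 : Int) (d1 : Int), Dom_count_zero_right mat k1 d1 → Pre_count_zero_right mat k1 d1 → Spec_count_zero_right mat k1 d1 (count_zero_right mat k1 d1)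

-- ===== LEMMAS AND PROOFS =====

-- number of zero-first rows
def zcnt (rows : List (List Int)) : Nat := rows.countP (fun r => r.headD 0 == 0)

-- the pairs A's first loop inserts into dc, starting from counters c, ci
def pairsZ : List (List Int) → Int → Int → List (Int × Int)
  | [], _, _ => []
  | r :: rs, c, ci =>
    if r.headD 0 == 0 then (c + 1, ci + 1) :: pairsZ rs (c + 1) (ci + 1)
    else pairsZ rs c (ci + 1)

-- index of the t-th zero-first row
def zpos : List (List Int) → Nat → Nat
  | [], _ => 0
  | r :: rs, t =>
    if r.headD 0 == 0 then
      (match t with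
       | 0 => 0
       | t + 1 => zpos rs t + 1)
    else zpos rs t + 1

-- reference: set the first element of the t-th zero-first row
def setZ : List (List Int) → Nat → Int → List (List Int)
  | [], _, _ => []
  | r :: rs, t, v =>
    if r.headD 0 == 0 then
      (match t with
       | 0 => (r.set 0 v) :: rs
       | t + 1 => r :: setZ rs t v)
    else r :: setZ rs t v

theorem pairsZ_key_bound : ∀ (rows : List (List Int)) (c ci k : Int),
    k ∈ (pairsZ rows c ci).map (·.1) → c < k := by
  intro rows
  induction rows with
  | nil => intro c ci k h; simp [pairsZ] at h
  | cons r rs ih =>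
    intro c ci k h
    simp only [pairsZ] at h
    split at h
    · simp only [List.map_cons, List.mem_cons] at h
      rcases h with h | h
      · omega
      · have := ih (c + 1) (ci + 1) k h; omega
    · exact ih c (ci + 1) k h

-- the body of A's first loop, named for the proofs
def czrF (s : Int × Int × PySem.Dict Int Int) (i : List Int) : Int × Int × PySem.Dict Int Int :=
  let count_index := s.2.1 + 1
  let a := i.headD 0
  if a == 0 then (s.1 + 1, count_index, s.2.2.insert (s.1 + 1) count_index)
  else (s.1, count_index, s.2.2)

theorem czrF_eq_lambda : czrF =
    (fun (s : Int × Int × PySem.Dict Int Int) i =>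
      let count_index := s.2.1 + 1
      let a := i.headD 0
      if a == 0 then (s.1 + 1, count_index, s.2.2.insert (s.1 + 1) count_index)
      else (s.1, count_index, s.2.2)) := rfl

theorem czrF_step_zero (c ci : Int) (d : PySem.Dict Int Int) (r : List Int)
    (h0 : (r.headD 0 == 0) = true) :
    czrF (c, ci, d) r = (c + 1, ci + 1, d.insert (c + 1) (ci + 1)) := by
  simp only [czrF]; rw [if_pos h0]

theorem czrF_step_nonzero (c ci : Int) (d : PySem.Dict Int Int) (r : List Int)
    (h0 : ¬ (r.headD 0 == 0) = true) :
    czrF (c, ci, d) r = (c, ci + 1, d) := by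
  simp only [czrF]; rw [if_neg h0]

theorem foldA_eq : ∀ (rows : List (List Int)) (c ci : Int) (d : PySem.Dict Int Int),
    (∀ k ∈ d.keys, k ≤ c) →
    rows.foldl czrF (c, ci, d)
    = (c + (zcnt rows : Int), ci + rows.length, PySem.Dict.mk (d.items ++ pairsZ rows c ci)) := by
  intro rows
  induction rows with
  | nil =>
    intro c ci d hb
    simp only [List.foldl_nil, zcnt, List.countP_nil, pairsZ, List.append_nil, List.length_nil]
    refine congrArg₂ _ (by push_cast; ring) (congrArg₂ _ (by push_cast; ring) ?_)
    apply PySem.Dict.ext; rfl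
  | cons r rs ih =>
    intro c ci d hb
    simp only [List.foldl_cons]
    by_cases h0 : (r.headD 0 == 0) = true
    · have hfresh : d.contains (c + 1) = false := by
        by_contra hc
        have hc' : d.contains (c + 1) = true := by
          cases h : d.contains (c + 1) <;> simp_all
        have hk := (PySem.Dict.contains_iff_mem_keys d (c + 1)).mp hc'
        have := hb _ hk; omega
      have hb' : ∀ k ∈ (d.insert (c + 1) (ci + 1)).keys, k ≤ c + 1 := by
        intro k hk
        rcases (PySem.Dict.mem_keys_insert d (c + 1) k (ci + 1)).mp hk with h | h
        · omega
        · have := hb _ h; omega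
      rw [czrF_step_zero c ci d r h0, ih (c + 1) (ci + 1) _ hb']
      have hits := PySem.Dict.items_insert_of_not_contains d (ci + 1) hfresh
      simp only [hits, zcnt, List.countP_cons, List.length_cons, Prod.mk.injEq]
      refine ⟨?_, ?_, ?_⟩
      · rw [if_pos h0]; push_cast; ring
      · push_cast; ring
      · simp only [pairsZ]; rw [if_pos h0]; simp [List.append_assoc]
    · rw [czrF_step_nonzero c ci d r h0, ih c (ci + 1) d hb]
      simp only [zcnt, List.countP_cons, List.length_cons, Prod.mk.injEq]
      refine ⟨?_, ?_, ?_⟩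
      · rw [if_neg h0]; push_cast; ring
      · push_cast; ring
      · simp only [pairsZ]; rw [if_neg h0]

theorem foldl_search_skip : ∀ (L : List Int) (tgt ch0 : Int) (g : Int → Int),
    (∀ j ∈ L, j ≠ tgt) →
    L.foldl (fun ch j => if j == tgt then g j else ch) ch0 = ch0 := by
  intro L
  induction L with
  | nil => intro tgt ch0 g h; rfl
  | cons x xs ih =>
    intro tgt ch0 g h
    simp only [List.foldl_cons]
    rw [if_neg (by simp only [beq_iff_eq]; exact fun he => h x (by simp) he)]
    exact ih tgt ch0 g (fun j hj => h j (by simp [hj]))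

theorem czr_foldl_congr : ∀ (L : List Int) (f g : Int → Int → Int) (a : Int),
    (∀ acc j, j ∈ L → f acc j = g acc j) →
    L.foldl f a = L.foldl g a := by
  intro L
  induction L with
  | nil => intro f g a h; rfl
  | cons x xs ih =>
    intro f g a h
    simp only [List.foldl_cons]
    rw [h a x (by simp)]
    exact ih f g _ (fun acc j hj => h acc j (by simp [hj]))

theorem searchA_eq : ∀ (rows : List (List Int)) (t : Nat) (c ci ch0 : Int),
    t < zcnt rows →
    ((PySem.Dict.mk (pairsZ rows c ci)).keys).foldl
      (fun ch j => if j == (c + 1 + (t : Int)) then (PySem.Dict.mk (pairsZ rows c ci)).getD j 0 else ch) ch0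
    = ci + 1 + (zpos rows t : Int) := by
  intro rows
  induction rows with
  | nil => intro t c ci ch0 ht; simp [zcnt] at ht
  | cons r rs ih =>
    intro t c ci ch0 ht
    by_cases h0 : (r.headD 0 == 0) = true
    · have hpz : pairsZ (r :: rs) c ci = (c + 1, ci + 1) :: pairsZ rs (c + 1) (ci + 1) := by
        simp only [pairsZ]; rw [if_pos h0]
      rw [hpz]
      have hkeys : (PySem.Dict.mk ((c + 1, ci + 1) :: pairsZ rs (c + 1) (ci + 1))).keys
          = (c + 1) :: (pairsZ rs (c + 1) (ci + 1)).map (·.1) := by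
        simp [PySem.Dict.keys]
      rw [hkeys]
      have hgetD_tail : ∀ j : Int, j ≠ c + 1 →
          (PySem.Dict.mk ((c + 1, ci + 1) :: pairsZ rs (c + 1) (ci + 1))).getD j 0
          = (PySem.Dict.mk (pairsZ rs (c + 1) (ci + 1))).getD j 0 := by
        intro j hj
        rw [PySem.Dict.getD_eq_get?_getD, PySem.Dict.getD_eq_get?_getD, PySem.Dict.get?_mk_cons]
        rw [if_neg (by simp only [beq_iff_eq]; omega)]
      cases t with
      | zero =>
        simp only [List.foldl_cons]
        rw [if_pos (by simp)]
        have hval : (PySem.Dict.mk ((c + 1, ci + 1) :: pairsZ rs (c + 1) (ci + 1))).getD (c + 1) 0 = ci + 1 := by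
          rw [PySem.Dict.getD_eq_get?_getD, PySem.Dict.get?_mk_cons]; simp
        rw [hval]
        rw [foldl_search_skip _ _ _ _ ?hskip]
        · have : zpos (r :: rs) 0 = 0 := by simp only [zpos]; rw [if_pos h0]
          rw [this]; simp
        case hskip =>
          intro j hj
          have := pairsZ_key_bound rs (c + 1) (ci + 1) j hj
          intro hje; omega
      | succ s =>
        simp only [List.foldl_cons]
        rw [if_neg (by simp only [beq_iff_eq]; push_cast; omega)]
        have hcg : ((pairsZ rs (c + 1) (ci + 1)).map (·.1)).foldl
            (fun ch j => if j == (c + 1 + ((s + 1 : Nat) : Int)) then (PySem.Dict.mk ((c + 1, ci + 1) :: pairsZ rs (c + 1) (ci + 1))).getD j 0 else ch) ch0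
            = ((pairsZ rs (c + 1) (ci + 1)).map (·.1)).foldl
            (fun ch j => if j == ((c + 1) + 1 + ((s : Nat) : Int)) then (PySem.Dict.mk (pairsZ rs (c + 1) (ci + 1))).getD j 0 else ch) ch0 := by
          apply czr_foldl_congr
          intro acc j hj
          have hbnd := pairsZ_key_bound rs (c + 1) (ci + 1) j hj
          have htg : (c + 1 + ((s + 1 : Nat) : Int)) = ((c + 1) + 1 + ((s : Nat) : Int)) := by push_cast; ring
          rw [htg]
          by_cases hje : j = (c + 1) + 1 + ((s : Nat) : Int)
          · rw [if_pos (by simp [hje]), if_pos (by simp [hje])]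
            exact hgetD_tail j (by omega)
          · rw [if_neg (by simp [hje]), if_neg (by simp [hje])]
        have hkeys' : (PySem.Dict.mk (pairsZ rs (c + 1) (ci + 1))).keys = (pairsZ rs (c + 1) (ci + 1)).map (·.1) := by
          simp [PySem.Dict.keys]
        have ht' : s < zcnt rs := by
          simp only [zcnt, List.countP_cons] at ht ⊢
          rw [if_pos h0] at ht; omega
        have hih := ih s (c + 1) (ci + 1) ch0 ht'
        rw [hkeys'] at hih
        rw [hcg, hih]
        have : zpos (r :: rs) (s + 1) = zpos rs s + 1 := by
          simp only [zpos]; rw [if_pos h0]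
        rw [this]; push_cast; ring
    · have hpz : pairsZ (r :: rs) c ci = pairsZ rs c (ci + 1) := by
        simp only [pairsZ]; rw [if_neg h0]
      have ht' : t < zcnt rs := by
        simp only [zcnt, List.countP_cons] at ht ⊢
        rw [if_neg h0] at ht; omega
      rw [hpz, ih t c (ci + 1) ch0 ht']
      have : zpos (r :: rs) t = zpos rs t + 1 := by
        cases t <;> (simp only [zpos]; rw [if_neg h0])
      rw [this]; push_cast; ring

theorem setAtA_eq_setZ : ∀ (rows : List (List Int)) (t : Nat) (v : Int),
    t < zcnt rows →
    pvSetAtA rows ((zpos rows t : Nat) : Int) v = setZ rows t v := by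
  intro rows
  induction rows with
  | nil => intro t v ht; simp [zcnt] at ht
  | cons r rs ih =>
    intro t v ht
    by_cases h0 : (r.headD 0 == 0) = true
    · cases t with
      | zero =>
        have hz : zpos (r :: rs) 0 = 0 := by simp only [zpos]; rw [if_pos h0]
        have hs : setZ (r :: rs) 0 v = (r.set 0 v) :: rs := by simp only [setZ]; rw [if_pos h0]
        rw [hz, hs]
        simp [pvSetAtA]
      | succ s =>
        have ht' : s < zcnt rs := by
          simp only [zcnt, List.countP_cons] at ht ⊢
          rw [if_pos h0] at ht; omega
        have hz : zpos (r :: rs) (s + 1) = zpos rs s + 1 := by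
          simp only [zpos]; rw [if_pos h0]
        have hs : setZ (r :: rs) (s + 1) v = r :: setZ rs s v := by
          simp only [setZ]; rw [if_pos h0]
        rw [hz, hs]
        simp only [pvSetAtA]
        rw [if_neg (by simp only [beq_iff_eq]; push_cast; omega)]
        have harg : ((zpos rs s + 1 : Nat) : Int) - 1 = ((zpos rs s : Nat) : Int) := by push_cast; ring
        rw [harg, ih s v ht']
    · have ht' : t < zcnt rs := by
        simp only [zcnt, List.countP_cons] at ht ⊢
        rw [if_neg h0] at ht; omega
      have hz : zpos (r :: rs) t = zpos rs t + 1 := by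
        cases t <;> (simp only [zpos]; rw [if_neg h0])
      have hs : setZ (r :: rs) t v = r :: setZ rs t v := by
        cases t <;> (simp only [setZ]; rw [if_neg h0])
      rw [hz, hs]
      simp only [pvSetAtA]
      rw [if_neg (by simp only [beq_iff_eq]; push_cast; omega)]
      have harg : ((zpos rs t + 1 : Nat) : Int) - 1 = ((zpos rs t : Nat) : Int) := by push_cast; ring
      rw [harg, ih t v ht']

-- B's counting loop adds zcnt
theorem foldB_count : ∀ (rows : List (List Int)) (a : Int),
    rows.foldl (fun (m : Int) row => if row.headD 0 == 0 then m + 1 else m) a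
    = a + (zcnt rows : Int) := by
  intro rows
  induction rows with
  | nil => intro a; simp [zcnt]
  | cons r rs ih =>
    intro a
    simp only [List.foldl_cons, zcnt, List.countP_cons]
    by_cases h0 : (r.headD 0 == 0) = true
    · rw [if_pos h0, ih (a + 1), if_pos h0]
      simp only [zcnt]; push_cast; ring
    · rw [if_neg h0, ih a, if_neg h0]
      simp only [zcnt]; push_cast; ring

-- B's rebuilding loop hits the t-th zero-first row and produces out ++ setZ rows t v
theorem czrBuild_eq_setZ : ∀ (rows : List (List Int)) (t : Nat) (v : Int) (out : List (List Int)),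
    (∀ r ∈ rows, r ≠ []) → t < zcnt rows →
    czrBuild rows ((t : Nat) : Int) v out = out ++ setZ rows t v := by
  intro rows
  induction rows with
  | nil => intro t v out _ ht; simp [zcnt] at ht
  | cons r rs ih =>
    intro t v out hne ht
    by_cases h0 : (r.headD 0 == 0) = true
    · cases t with
      | zero =>
        simp only [czrBuild]
        rw [if_pos h0, if_pos (by simp)]
        have hr : r ≠ [] := hne r (by simp)
        cases r with
        | nil => exact absurd rfl hr
        | cons a l =>
          simp only [setZ]
          rw [if_pos h0]
          simp [List.set]
      | succ s =>
        simp only [czrBuild]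
        rw [if_pos h0, if_neg (by simp only [beq_iff_eq]; push_cast; omega)]
        have ht' : s < zcnt rs := by
          simp only [zcnt, List.countP_cons] at ht ⊢
          rw [if_pos h0] at ht; omega
        have harg : ((s + 1 : Nat) : Int) - 1 = ((s : Nat) : Int) := by push_cast; ring
        rw [harg, ih s v (out ++ [r]) (fun x hx => hne x (by simp [hx])) ht']
        have hs : setZ (r :: rs) (s + 1) v = r :: setZ rs s v := by
          simp only [setZ]; rw [if_pos h0]
        rw [hs]; simp
    · simp only [czrBuild]
      rw [if_neg h0]
      have ht' : t < zcnt rs := by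
        simp only [zcnt, List.countP_cons] at ht ⊢
        rw [if_neg h0] at ht; omega
      rw [ih t v (out ++ [r]) (fun x hx => hne x (by simp [hx])) ht']
      have hs : setZ (r :: rs) t v = r :: setZ rs t v := by
        cases t <;> (simp only [setZ]; rw [if_neg h0])
      rw [hs]; simp

-- ===== VERDICT (by name: the statement is the Claim_ definition above) =====
theorem count_zero_right_spec : Claim_equal_count_zero_right := by
  intro mat k1 d1 _ hpre
  unfold Spec_count_zero_right count_zero_right count_zero_right_alt
  rw [← czrF_eq_lambda]
  have hfold := foldA_eq mat (-1) (-1) PySem.Dict.empty (by simp)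
  rw [hfold, foldB_count mat 0]
  have hempty : (PySem.Dict.empty : PySem.Dict Int Int).items = [] := rfl
  simp only [hempty, List.nil_append]
  have hne : ∀ r ∈ mat, r ≠ [] := by
    intro r hr h
    subst h
    have := List.all_eq_true.mp hpre [] hr
    simp at this
  by_cases hz : zcnt mat = 0
  · rw [if_pos (by simp only [beq_iff_eq]; omega), if_pos (by simp only [beq_iff_eq]; omega)]
  · have hzpos : (0 : Int) < (zcnt mat : Int) := by exact_mod_cast Nat.pos_of_ne_zero hz
    rw [if_neg (by simp only [beq_iff_eq]; omega), if_neg (by simp only [beq_iff_eq]; omega)]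
    have hm : (-1 : Int) + (zcnt mat : Int) + 1 = (zcnt mat : Int) := by ring
    have hm' : (0 : Int) + (zcnt mat : Int) = (zcnt mat : Int) := by ring
    rw [hm, hm']
    set q := PySem.Int.mod k1 ((zcnt mat : Int)) with hq
    have hqe : q = k1 % (zcnt mat : Int) := PySem.Int.mod_eq_emod_of_pos hzpos
    have hq0 : 0 ≤ q := by rw [hqe]; exact Int.emod_nonneg _ (by omega)
    have hqlt : q < (zcnt mat : Int) := by rw [hqe]; exact Int.emod_lt_of_pos _ hzpos
    have htlt : q.toNat < zcnt mat := by omega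
    have htgt : q = (-1 : Int) + 1 + (q.toNat : Int) := by omega
    have hsearch := searchA_eq mat q.toNat (-1) (-1) 0 htlt
    rw [← htgt] at hsearch
    rw [hsearch]
    have hchange : (-1 : Int) + 1 + (zpos mat q.toNat : Int) = ((zpos mat q.toNat : Nat) : Int) := by ring
    rw [hchange, setAtA_eq_setZ mat q.toNat d1 htlt]
    have hqq : q = ((q.toNat : Nat) : Int) := by omega
    have hfin : ((q.toNat : Nat) : Int).toNat = q.toNat := by omega
    rw [hqq, czrBuild_eq_setZ mat q.toNat d1 [] hne htlt, List.nil_append, hfin]
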